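-- pv_equiv track=rewrite | github.com/johnflavin/advent-of-code-2021 | advent_of_code/year_2021/day_19.py | make_canonical
-- ===== SOURCE A (Python) =====
-- from typing import Tuple
--
-- Vector = Tuple[int, ...]
--
-- def make_canonical(diff: Vector) -> Vector:
--     """Turn a diff vector of unknown rotation into a "canonical"
--     form which is equivalent to the original under some rotation
--     in our set.
--     If two vectors have the same canonical form we know they are
--     both in the equivalence class. This is a faster way to show
--     equivalence (or not) of two vectors than trying out all 24
--     rotations to see if any work.
--     """
--
--     # sort by abs value
--     abs_diff = tuple(abs(x) for x in diff)
--     min_i = abs_diff.index(min(abs_diff))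
--     max_i = abs_diff.index(max(abs_diff))
--     middle_i = ({0, 1, 2} - {min_i, max_i}).pop()
--
--     # figure out if we need to add a negative sign when swapping
--     # if number of swaps is odd, must add negative sign
--     idx = (min_i, middle_i, max_i)
--     if idx == (0, 1, 2) or idx == (2, 0, 1) or idx == (1, 2, 0):
--         diff = (diff[min_i], diff[middle_i], diff[max_i])
--     else:
--         diff = (diff[min_i], diff[middle_i], -diff[max_i])
--
--     # Ensure at most one negative in third position
--     negatives = tuple(x < 0 for x in diff)
--     num_negatives = sum(negatives)
--     if num_negatives == 1:
--         # If it's on the first or second, move it to the third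
--         if negatives[0]:
--             diff = (-diff[0], diff[1], -diff[2])
--         elif negatives[1]:
--             diff = (diff[0], -diff[1], -diff[2])
--     elif num_negatives == 2:
--         # Get rid of both negatives
--         diff = tuple((-1) ** neg * d for neg, d in zip(negatives, diff))
--     elif num_negatives == 3:
--         # Get rid of two negatives on first and second
--         diff = (-diff[0], -diff[1], diff[2])
--
--     return diff
-- ===== SOURCE B (Python) =====
-- def make_canonical(diff):
--     """Canonical form of a 3-vector under the rotation group.
--
--     Same index selection as the original, but the sign handling is a
--     single closed-form parity computation instead of the two-stage
--     branchy normalization: the result is always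
--     (|d_min|, |d_mid|, +/-|d_max|), negative third entry iff
--     (number of negative components) is odd XOR (the index permutation
--     is odd and the max component is nonzero).
--     """
--     mags = tuple(abs(x) for x in diff)
--     min_i = mags.index(min(mags))
--     max_i = mags.index(max(mags))
--     middle_i = next(i for i in (0, 1, 2) if i != min_i and i != max_i)
--     perm_odd = (min_i, middle_i, max_i) not in ((0, 1, 2), (2, 0, 1), (1, 2, 0))
--     n_neg = sum(d < 0 for d in (diff[min_i], diff[middle_i], diff[max_i]))
--     flip = (n_neg % 2 == 1) != (perm_odd and diff[max_i] != 0)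
--     third = -mags[max_i] if flip else mags[max_i]
--     return (mags[min_i], mags[middle_i], third)
-- ===== Notes on version B (the rewrite author's own statement) =====
-- stated objective: simpler
-- what changed: A's two-stage branchy sign normalization (a 3-way permutation-parity branch followed by a 4-way count-of-negatives case split that rewrites the tuple) is replaced by one closed-form parity computation: the result is always (|d_min|,|d_mid|,±|d_max|), with the third entry negated iff the negatives-count parity XOR (odd index permutation and nonzero max component) holds.
import Mathlib
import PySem

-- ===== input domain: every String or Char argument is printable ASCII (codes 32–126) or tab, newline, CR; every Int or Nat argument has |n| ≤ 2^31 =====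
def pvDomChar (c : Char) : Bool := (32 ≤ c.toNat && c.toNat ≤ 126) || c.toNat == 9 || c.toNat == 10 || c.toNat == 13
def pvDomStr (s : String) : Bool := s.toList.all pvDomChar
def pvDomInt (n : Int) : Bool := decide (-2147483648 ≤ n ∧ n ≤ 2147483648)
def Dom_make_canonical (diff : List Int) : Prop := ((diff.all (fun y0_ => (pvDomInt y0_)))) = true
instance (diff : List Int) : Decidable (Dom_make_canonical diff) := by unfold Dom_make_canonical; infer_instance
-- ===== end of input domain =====

-- B replaces A's two-stage branchy sign normalization by one closed-form parity
-- computation (objective: simpler); return value only, no mutation involved.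

-- ===== PORT A =====
-- literal transliteration of Source A's make_canonical
def make_canonical (diff : List Int) : List Int :=
  let abs_diff := diff.map (fun x => |x|)
  match PySem.List.min? abs_diff (fun x => x), PySem.List.max? abs_diff (fun x => x) with
  | some mn, some mx =>
    match PySem.List.index? abs_diff mn, PySem.List.index? abs_diff mx with
    | some min_i, some max_i =>
      -- ({0,1,2} - {min_i, max_i}).pop(): CPython pops the smallest remaining
      -- element for these subsets of {0,1,2} (small-int hashing), ported exactly
      let middle_i : Nat :=
        if min_i != 0 && max_i != 0 then 0
        else if min_i != 1 && max_i != 1 then 1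
        else 2
      -- idx == (0,1,2) or (2,0,1) or (1,2,0)
      let ev : Bool :=
        (min_i == 0 && middle_i == 1 && max_i == 2) ||
        (min_i == 2 && middle_i == 0 && max_i == 1) ||
        (min_i == 1 && middle_i == 2 && max_i == 0)
      match PySem.List.pyGet? diff (min_i : Int), PySem.List.pyGet? diff (middle_i : Int),
            PySem.List.pyGet? diff (max_i : Int) with
      | some a0, some b0, some c0 =>
        let p := if ev then (a0, b0, c0) else (a0, b0, -c0)
        let neg1 := decide (p.1 < 0)
        let neg2 := decide (p.2.1 < 0)
        let neg3 := decide (p.2.2 < 0)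
        let num : Nat := (cond neg1 1 0) + (cond neg2 1 0) + (cond neg3 1 0)
        let q :=
          if num = 1 then
            if neg1 then (-p.1, p.2.1, -p.2.2)
            else if neg2 then (p.1, -p.2.1, -p.2.2)
            else p
          else if num = 2 then
            -- (-1) ** neg * d componentwise
            (cond neg1 (-p.1) p.1, cond neg2 (-p.2.1) p.2.1, cond neg3 (-p.2.2) p.2.2)
          else if num = 3 then (-p.1, -p.2.1, p.2.2)
          else p
        [q.1, q.2.1, q.2.2]
      | _, _, _ => []  -- IndexError, outside Pre_
    | _, _ => []
  | _, _ => []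

-- ===== PORT B =====
-- literal transliteration of Source B's make_canonical
def make_canonical_alt (diff : List Int) : List Int :=
  let mags := diff.map (fun x => |x|)
  match PySem.List.min? mags (fun x => x) with
  | none => []
  | some mn =>
  match PySem.List.max? mags (fun x => x) with
  | none => []
  | some mx =>
  match PySem.List.index? mags mn with
  | none => []
  | some min_i =>
  match PySem.List.index? mags mx with
  | none => []
  | some max_i =>
      -- next(i for i in (0, 1, 2) if i != min_i and i != max_i)
      let middle_i : Nat :=
        if min_i != 0 && max_i != 0 then 0
        else if min_i != 1 && max_i != 1 then 1
        else 2
      let perm_odd : Bool :=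
        !((min_i == 0 && middle_i == 1 && max_i == 2) ||
          (min_i == 2 && middle_i == 0 && max_i == 1) ||
          (min_i == 1 && middle_i == 2 && max_i == 0))
      -- IndexError at any of these lookups is outside Pre_
      match PySem.List.pyGet? diff (min_i : Int) with
      | none => []
      | some d1 =>
      match PySem.List.pyGet? diff (middle_i : Int) with
      | none => []
      | some d2 =>
      match PySem.List.pyGet? diff (max_i : Int) with
      | none => []
      | some d3 =>
      match PySem.List.pyGet? mags (min_i : Int) with
      | none => []
      | some m1 =>
      match PySem.List.pyGet? mags (middle_i : Int) with
      | none => []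
      | some m2 =>
      match PySem.List.pyGet? mags (max_i : Int) with
      | none => []
      | some m3 =>
        let n_neg : Nat :=
          (cond (decide (d1 < 0)) 1 0) + (cond (decide (d2 < 0)) 1 0) + (cond (decide (d3 < 0)) 1 0)
        let flip : Bool := (n_neg % 2 == 1) != (perm_odd && d3 != 0)
        [m1, m2, if flip then -m3 else m3]

-- ===== PRECONDITION & SPEC =====
-- Pre_ is exactly the set of inputs on which the Python A returns normally:
-- A raises IndexError/ValueError on lists of length 0 or 1, and on length-2
-- lists whose two components have distinct absolute values.
def Pre_make_canonical (diff : List Int) : Prop :=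
  3 ≤ diff.length ∨ (diff.length = 2 ∧ |diff.getD 0 0| = |diff.getD 1 0|)
instance (diff : List Int) : Decidable (Pre_make_canonical diff) := by
  unfold Pre_make_canonical; infer_instance

def pvWitness_make_canonical : List Int := [3, -1, 2]

def Spec_make_canonical (diff : List Int) (out : List Int) : Prop := out = make_canonical_alt diff
instance (diff : List Int) (out : List Int) : Decidable (Spec_make_canonical diff out) := by
  unfold Spec_make_canonical; infer_instance

-- ===== CLAIM (what is proved, stated in full; the proofs are below) =====
def Claim_equal_make_canonical : Prop := ∀ (diff : List Int), Dom_make_canonical diff → Pre_make_canonical diff → Spec_make_canonical diff (make_canonical diff)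

-- ===== LEMMAS AND PROOFS =====

-- the shared tail: once the three selected components d1, d2, d3 (and the parity
-- bit ev of the index permutation) are fixed, A's two-stage normalization equals
-- B's closed-form (|d1|, |d2|, ±|d3|)
lemma pv_core (ev : Bool) (d1 d2 d3 : Int) :
    (let p := if ev then (d1, d2, d3) else (d1, d2, -d3)
     let neg1 := decide (p.1 < 0)
     let neg2 := decide (p.2.1 < 0)
     let neg3 := decide (p.2.2 < 0)
     let num : Nat := (cond neg1 1 0) + (cond neg2 1 0) + (cond neg3 1 0)
     let q :=
       if num = 1 then
         if neg1 then (-p.1, p.2.1, -p.2.2)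
         else if neg2 then (p.1, -p.2.1, -p.2.2)
         else p
       else if num = 2 then
         (cond neg1 (-p.1) p.1, cond neg2 (-p.2.1) p.2.1, cond neg3 (-p.2.2) p.2.2)
       else if num = 3 then (-p.1, -p.2.1, p.2.2)
       else p
     [q.1, q.2.1, q.2.2])
    =
    (let n_neg : Nat :=
       (cond (decide (d1 < 0)) 1 0) + (cond (decide (d2 < 0)) 1 0) + (cond (decide (d3 < 0)) 1 0)
     let flip : Bool := (n_neg % 2 == 1) != ((!ev) && d3 != 0)
     [|d1|, |d2|, if flip then -|d3| else |d3|]) := by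
  rcases ev <;>
    rcases lt_trichotomy d1 0 with h1 | h1 | h1 <;>
    rcases lt_trichotomy d2 0 with h2 | h2 | h2 <;>
    rcases lt_trichotomy d3 0 with h3 | h3 | h3 <;>
    simp_all [abs_of_neg, abs_of_nonneg, le_of_lt, not_lt_of_gt]

-- ===== VERDICT (by name: the statement is the Claim_ definition above) =====
theorem make_canonical_spec : Claim_equal_make_canonical := by
  intro diff _ hpre
  unfold Spec_make_canonical make_canonical make_canonical_alt
  have hlen2 : 2 ≤ diff.length := by
    rcases hpre with h | ⟨h, _⟩ <;> omega
  have hne : diff.map (fun x => |x|) ≠ [] := by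
    simp only [ne_eq, List.map_eq_nil_iff]
    intro h
    subst h
    simp at hlen2
  obtain ⟨mn, hmn⟩ : ∃ mn, PySem.List.min? (diff.map (fun x => |x|)) (fun x => x) = some mn := by
    cases h : PySem.List.min? (diff.map (fun x => |x|)) (fun x => x) with
    | none => exact absurd ((PySem.List.min?_eq_none_iff _ _).mp h) hne
    | some v => exact ⟨v, rfl⟩
  obtain ⟨mx, hmx⟩ : ∃ mx, PySem.List.max? (diff.map (fun x => |x|)) (fun x => x) = some mx := by
    cases h : PySem.List.max? (diff.map (fun x => |x|)) (fun x => x) with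
    | none => exact absurd ((PySem.List.max?_eq_none_iff _ _).mp h) hne
    | some v => exact ⟨v, rfl⟩
  obtain ⟨mi, hmi⟩ : ∃ i, PySem.List.index? (diff.map (fun x => |x|)) mn = some i := by
    have := (PySem.List.index?_isSome_iff _ _).mpr (PySem.List.min?_mem hmn)
    exact Option.isSome_iff_exists.mp this
  obtain ⟨xi, hxi⟩ : ∃ i, PySem.List.index? (diff.map (fun x => |x|)) mx = some i := by
    have := (PySem.List.index?_isSome_iff _ _).mpr (PySem.List.max?_mem hmx)
    exact Option.isSome_iff_exists.mp this
  obtain ⟨hmi_lt, -, -⟩ := PySem.List.getElem_of_index?_eq_some hmi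
  obtain ⟨hxi_lt, -, -⟩ := PySem.List.getElem_of_index?_eq_some hxi
  rw [List.length_map] at hmi_lt hxi_lt
  simp only [hmn, hmx, hmi, hxi]
  have hjj_lt : (if (mi != 0 && xi != 0) = true then 0 else if (mi != 1 && xi != 1) = true then 1 else 2) < diff.length := by
    rcases hpre with h3 | ⟨h2, habs⟩
    · split_ifs <;> omega
    · obtain ⟨x, y, rfl⟩ := List.length_eq_two.mp h2
      simp only [List.getD] at habs
      simp only [List.map_cons, List.map_nil] at hmn hmx hmi hxi
      have hxeq : |x| = |y| := by simpa using habs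
      have hmn' : mn = |x| := by
        have hm := PySem.List.min?_mem hmn
        simp only [List.mem_cons, List.not_mem_nil, or_false] at hm
        rcases hm with h | h
        · exact h
        · rw [h, ← hxeq]
      have hmx' : mx = |x| := by
        have hm := PySem.List.max?_mem hmx
        simp only [List.mem_cons, List.not_mem_nil, or_false] at hm
        rcases hm with h | h
        · exact h
        · rw [h, ← hxeq]
      rw [hmn', PySem.List.index?_cons_self] at hmi
      rw [hmx', PySem.List.index?_cons_self] at hxi
      obtain rfl : mi = 0 := (Option.some.inj hmi).symm
      obtain rfl : xi = 0 := (Option.some.inj hxi).symm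
      simp
  set jj : Nat := (if (mi != 0 && xi != 0) = true then 0 else if (mi != 1 && xi != 1) = true then 1 else 2) with hjj
  simp only [PySem.List.pyGet?_natCast, List.getElem?_map,
    List.getElem?_eq_getElem hmi_lt, List.getElem?_eq_getElem hxi_lt, List.getElem?_eq_getElem hjj_lt,
    Option.map_some]
  exact pv_core _ _ _ _
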